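-- pv_equiv track=rewrite | github.com/aundus/PythonProjects | life_starter/life.py | innerCells
-- ===== SOURCE A (Python) =====
-- def createOneRow(width):
--     """Returns one row of zeros of width "width"...
--        You should use this in your
--        createBoard(width, height) function."""
--     row = []
--     for col in range(width):
--         row += [0]
--     return row
--
-- def createBoard(width, height):
--     """ returns a 2d array with "height" rows and "width" cols """
--     A = []
--     for row in range(height):
--         A.append(createOneRow(width))
--     return A
--
-- def innerCells(width,height):
--     """ Create a board with all inner cells live and all edges not"""
--     A = createBoard(width, height)
--     for row in range(height):
--         for col in range(width):
--             if row == 0 or col == 0 or row == height-1 or col == width-1: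
--                 A[row][col] = 0
--             else:
--                 A[row][col] = 1
--     return A
-- ===== SOURCE B (Python) =====
-- def innerCells(width, height):
--     """ Create a board with all inner cells live and all edges not"""
--     if height <= 0:
--         return []
--     border = [0] * max(0, width)
--     if width < 3:
--         interior = [0] * max(0, width)
--     else:
--         interior = [0] + [1] * (width - 2) + [0]
--     return [list(border) if r == 0 or r == height - 1 else list(interior)
--             for r in range(height)]
-- ===== Notes on version B (the rewrite author's own statement) =====
-- stated objective: faster
-- what changed: B builds the board from two precomputed row templates (a zero border row and an interior row) copied once per row, instead of A's per-cell double loop testing a 4-way border condition at every cell.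
import Mathlib
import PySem

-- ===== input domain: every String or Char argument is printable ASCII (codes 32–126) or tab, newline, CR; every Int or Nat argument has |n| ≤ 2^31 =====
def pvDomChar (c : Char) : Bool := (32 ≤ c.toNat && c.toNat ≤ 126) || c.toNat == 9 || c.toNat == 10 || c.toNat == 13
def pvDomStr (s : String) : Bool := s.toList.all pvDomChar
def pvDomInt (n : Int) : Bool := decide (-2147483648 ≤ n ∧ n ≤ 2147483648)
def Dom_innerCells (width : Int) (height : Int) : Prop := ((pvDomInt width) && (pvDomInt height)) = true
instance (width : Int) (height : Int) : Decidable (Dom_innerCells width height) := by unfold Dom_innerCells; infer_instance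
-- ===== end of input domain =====

-- B builds the board from two row templates (border / interior) instead of testing the
-- 4-way border condition at every cell; same return value, per-row construction.

-- ===== PORT A =====
def createOneRow (width : Int) : List Int :=
  (PySem.List.pyRange 0 width 1).foldl (fun row _ => row ++ [(0 : Int)]) []

def createBoard (width : Int) (height : Int) : List (List Int) :=
  (PySem.List.pyRange 0 height 1).foldl (fun A _ => A ++ [createOneRow width]) []

def innerCells (width : Int) (height : Int) : List (List Int) :=
  (PySem.List.pyRange 0 height 1).foldl (fun A row =>
    (PySem.List.pyRange 0 width 1).foldl (fun A col =>
      A.set row.toNat ((A.getD row.toNat []).set col.toNat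
        (if row = 0 ∨ col = 0 ∨ row = height - 1 ∨ col = width - 1 then (0 : Int) else 1))) A)
    (createBoard width height)

-- ===== PORT B =====
def innerCells_alt (width : Int) (height : Int) : List (List Int) :=
  if height ≤ 0 then []
  else
    let border : List Int := List.replicate (max 0 width).toNat 0
    let interior : List Int :=
      if width < 3 then List.replicate (max 0 width).toNat 0
      else 0 :: (List.replicate (width - 2).toNat 1 ++ [0])
    (PySem.List.pyRange 0 height 1).map
      (fun r => if r = 0 ∨ r = height - 1 then border else interior)

-- ===== PRECONDITION & SPEC =====
def Spec_innerCells (width : Int) (height : Int) (out : List (List Int)) : Prop := out = innerCells_alt width height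
instance (width : Int) (height : Int) (out : List (List Int)) : Decidable (Spec_innerCells width height out) := by unfold Spec_innerCells; infer_instance

-- ===== CLAIM (what is proved, stated in full; the proofs are below) =====
def Claim_equal_innerCells : Prop := ∀ (width : Int) (height : Int), Dom_innerCells width height → Spec_innerCells width height (innerCells width height)

-- ===== LEMMAS AND PROOFS =====

-- The value A writes at cell (row, col).
def pvCell (width : Int) (height : Int) (r : Int) (c : Int) : Int :=
  if r = 0 ∨ c = 0 ∨ r = height - 1 ∨ c = width - 1 then 0 else 1

-- The row A produces at row index r (as a Nat).
def pvRow (width : Int) (height : Int) (k : Nat) : List Int :=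
  (List.range width.toNat).map (fun (c : Nat) => pvCell width height (k : Int) (c : Int))

theorem pv_createOneRow (width : Int) :
    createOneRow width = List.replicate width.toNat 0 := by
  unfold createOneRow
  rw [PySem.List.foldl_append_singleton_eq_map (fun _ => (0 : Int))]
  simp [List.map_const', PySem.List.length_pyRange_one]

theorem pv_createBoard (width height : Int) :
    createBoard width height = List.replicate height.toNat (List.replicate width.toNat 0) := by
  unfold createBoard
  rw [PySem.List.foldl_append_singleton_eq_map (fun _ => createOneRow width)]
  simp [List.map_const', PySem.List.length_pyRange_one, pv_createOneRow]

-- The inner column loop only touches row n of the board.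
theorem pv_inner_extract (l : List Nat) (g : Nat → Int) :
    ∀ (A : List (List Int)) (n : Nat), n < A.length →
    l.foldl (fun A c => A.set n ((A.getD n []).set c (g c))) A
      = A.set n (l.foldl (fun ys c => ys.set c (g c)) (A.getD n [])) := by
  induction l with
  | nil =>
    intro A n hn
    simp only [List.foldl_nil]
    rw [List.getD, List.getElem?_eq_getElem hn]
    simp
  | cons c t ih =>
    intro A n hn
    simp only [List.foldl_cons]
    rw [ih _ n (by simpa using hn), List.set_set]
    congr 1
    simp [List.getD, List.getElem?_set_self hn]

-- Setting the slot just past a prefix of length n of a concatenation.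
theorem pv_set_join {α : Type} (ys xs : List α) (v : α) (n : Nat) (h : ys.length = n) :
    (ys ++ xs).set n v = ys ++ xs.set 0 v := by
  subst h; simp

-- Setting columns 0..m-1 left to right overwrites the prefix with the mapped values.
theorem pv_set_all (g : Nat → Int) :
    ∀ (m : Nat) (xs : List Int), m ≤ xs.length →
    (List.range m).foldl (fun ys k => ys.set k (g k)) xs
      = (List.range m).map g ++ xs.drop m := by
  intro m
  induction m with
  | zero => simp
  | succ m ih =>
    intro xs hm
    rw [List.range_succ, List.foldl_append, ih xs (by omega)]
    simp only [List.foldl_cons, List.foldl_nil, List.map_append, List.map_cons, List.map_nil]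
    rw [pv_set_join _ _ _ _ (by simp),
        List.drop_eq_getElem_cons (show m < xs.length by omega), List.set_cons_zero]
    simp

-- Row by row over the zero board: the first m rows become pvRow, the rest stay zero.
theorem pv_outer (width height : Int) :
    ∀ (m : Nat), m ≤ height.toNat →
    (List.range m).foldl
      (fun A k =>
        (List.range width.toNat).foldl (fun A c =>
          A.set k ((A.getD k []).set c
            (if (k : Int) = 0 ∨ (c : Int) = 0 ∨ (k : Int) = height - 1 ∨ (c : Int) = width - 1
             then (0 : Int) else 1))) A)
      (List.replicate height.toNat (List.replicate width.toNat 0))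
      = (List.range m).map (pvRow width height)
          ++ List.replicate (height.toNat - m) (List.replicate width.toNat 0) := by
  intro m
  induction m with
  | zero => simp
  | succ m ih =>
    intro hm
    rw [List.range_succ, List.foldl_append, ih (by omega)]
    simp only [List.foldl_cons, List.foldl_nil]
    set B := (List.range m).map (pvRow width height)
      ++ List.replicate (height.toNat - m) (List.replicate width.toNat 0) with hB
    have hBlen : B.length = height.toNat := by simp [hB]; omega
    have hmB : m < B.length := by omega
    have hgetD : B.getD m [] = List.replicate width.toNat 0 := by
      have hsome : B[m]? = some (List.replicate width.toNat 0) := by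
        rw [hB, List.getElem?_append_right (by simp)]
        simp only [List.length_map, List.length_range, List.getElem?_replicate]
        rw [if_pos (by omega)]
      simp [List.getD, hsome]
    rw [pv_inner_extract (List.range width.toNat)
      (fun (c : Nat) => if (m : Int) = 0 ∨ (c : Int) = 0 ∨ (m : Int) = height - 1 ∨ (c : Int) = width - 1
                then (0 : Int) else 1) B m hmB, hgetD]
    rw [pv_set_all _ width.toNat (List.replicate width.toNat (0:Int)) (by simp)]
    have hrow : (List.range width.toNat).map
        (fun (c : Nat) => if (m : Int) = 0 ∨ (c : Int) = 0 ∨ (m : Int) = height - 1 ∨ (c : Int) = width - 1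
                  then (0 : Int) else 1) ++ (List.replicate width.toNat (0:Int)).drop width.toNat
        = pvRow width height m := by
      simp [pvRow, pvCell]
    rw [hrow]
    rw [hB, pv_set_join _ _ _ _ (by simp)]
    rw [show height.toNat - m = (height.toNat - (m + 1)) + 1 by omega,
      List.replicate_succ, List.set_cons_zero]
    simp

-- A computes the per-row map of pvRow.
theorem pv_A_eq (width height : Int) :
    innerCells width height = (List.range height.toNat).map (pvRow width height) := by
  unfold innerCells
  rw [pv_createBoard, PySem.List.pyRange_one 0 height, PySem.List.pyRange_one 0 width]
  simp only [Int.sub_zero, List.foldl_map, zero_add, Int.toNat_natCast]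
  rw [pv_outer width height height.toNat (le_refl _)]
  simp

-- The border row of A equals B's border template.
theorem pv_row_border (width height : Int) (k : Nat)
    (h : (k : Int) = 0 ∨ (k : Int) = height - 1) :
    pvRow width height k = List.replicate (max 0 width).toNat 0 := by
  unfold pvRow pvCell
  have hmax : (max 0 width).toNat = width.toNat := by omega
  rw [hmax]
  rw [List.eq_replicate_iff]
  constructor
  · simp
  · intro b hb
    simp only [List.mem_map] at hb
    obtain ⟨c, _, hc⟩ := hb
    rcases h with h | h <;> simp [h] at hc <;> omega

-- An interior row of A equals B's interior template.
theorem pv_row_interior (width height : Int) (k : Nat)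
    (h0 : ¬((k : Int) = 0 ∨ (k : Int) = height - 1)) :
    pvRow width height k
      = (if width < 3 then List.replicate (max 0 width).toNat (0:Int)
         else 0 :: (List.replicate (width - 2).toNat 1 ++ [0])) := by
  push Not at h0
  obtain ⟨h1, h2⟩ := h0
  unfold pvRow
  have hcell : ∀ c : Nat, pvCell width height (k : Int) (c : Int)
      = (if (c : Int) = 0 ∨ (c : Int) = width - 1 then (0:Int) else 1) := by
    intro c
    unfold pvCell
    split_ifs <;> first | rfl | omega
  rw [show (fun (c : Nat) => pvCell width height (k : Int) (c : Int))
      = (fun (c : Nat) => if (c : Int) = 0 ∨ (c : Int) = width - 1 then (0:Int) else 1)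
    from funext hcell]
  split_ifs with hw
  · -- width < 3: every column is a border column
    have hmax : (max 0 width).toNat = width.toNat := by omega
    rw [hmax, List.eq_replicate_iff]
    refine ⟨by simp, ?_⟩
    intro b hb
    simp only [List.mem_map, List.mem_range] at hb
    obtain ⟨c, hc, hcb⟩ := hb
    have hd : (c : Int) = 0 ∨ (c : Int) = width - 1 := by omega
    rw [if_pos hd] at hcb
    omega
  · -- width ≥ 3
    apply List.ext_getElem
    · simp; omega
    · intro i hi hi'
      simp only [List.length_map, List.length_range] at hi
      rw [List.getElem_map, List.getElem_range, List.getElem_cons]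
      by_cases hz : i = 0
      · simp [hz]
      · rw [dif_neg hz]
        by_cases h2' : i = width.toNat - 1
        · have hd : (i : Int) = width - 1 := by omega
          rw [if_pos (Or.inr hd), List.getElem_append_right (by simp; omega)]
          simp
        · have hc : ¬((i : Int) = 0 ∨ (i : Int) = width - 1) := by omega
          rw [if_neg hc, List.getElem_append_left (by simp; omega)]
          simp

-- B with the templates inlined (pure zeta-unfolding of the lets).
theorem pv_alt_eq (width height : Int) (hh : ¬ height ≤ 0) :
    innerCells_alt width height
      = (PySem.List.pyRange 0 height 1).map
          (fun r => if r = 0 ∨ r = height - 1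
                    then List.replicate (max 0 width).toNat (0:Int)
                    else (if width < 3 then List.replicate (max 0 width).toNat (0:Int)
                          else 0 :: (List.replicate (width - 2).toNat 1 ++ [0]))) := by
  unfold innerCells_alt
  rw [if_neg hh]

-- ===== VERDICT (by name: the statement is the Claim_ definition above) =====
theorem innerCells_spec : Claim_equal_innerCells := by
  intro width height _
  unfold Spec_innerCells
  rw [pv_A_eq]
  by_cases hh : height ≤ 0
  · unfold innerCells_alt
    rw [if_pos hh]
    simp [show height.toNat = 0 by omega]
  · rw [pv_alt_eq width height hh, PySem.List.pyRange_one]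
    simp only [Int.sub_zero, List.map_map]
    apply List.map_congr_left
    intro k _
    simp only [Function.comp_apply, zero_add]
    by_cases hb : (k : Int) = 0 ∨ (k : Int) = height - 1
    · rw [if_pos hb, pv_row_border width height k hb]
    · rw [if_neg hb, pv_row_interior width height k hb]
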